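-- pv_equiv track=rewrite | github.com/Kusekushi/didhub | utils/api_client_generator/parser.py | _extract_string_literal_from_text
-- ===== SOURCE A (Python) =====
-- from typing import Callable, Dict, List, Optional, Tuple
--
-- def _extract_string_literal_from_text(text: str, start_index: int) -> Tuple[Optional[str], int]:
--     """Extract a string literal starting at the given index within raw text."""
--     if start_index >= len(text):
--         return None, start_index
--
--     quote = text[start_index]
--     if quote not in ('"', "'"):
--         return None, start_index
--
--     i = start_index + 1
--     escape = False
--     while i < len(text):
--         ch = text[i]
--         if escape:
--             escape = False
--         elif ch == '\\':
--             escape = True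
--         elif ch == quote:
--             literal = text[start_index + 1:i]
--             return literal, i + 1
--         i += 1
--
--     # Unterminated string literal; return None but advance to end to avoid infinite loops
--     return None, len(text)
-- ===== SOURCE B (Python) =====
-- def _extract_string_literal_from_text(text, start_index):
--     """Extract a string literal starting at the given index within raw text."""
--     n = len(text)
--     if start_index >= n:
--         return None, start_index
--
--     quote = text[start_index]
--     if quote not in ('"', "'"):
--         return None, start_index
--
--     # Jump between "interesting" characters (closing quote or backslash) with
--     # str.find instead of walking char by char with an escape flag: a backslash
--     # skips the next character, the first unescaped closing quote ends the literal.
--     i = start_index + 1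
--     while i < n:
--         jq = text.find(quote, i)
--         jb = text.find('\\', i)
--         if jq == -1 and jb == -1:
--             break
--         j = jq if jb == -1 else (jb if jq == -1 else min(jq, jb))
--         if text[j] == '\\':
--             i = j + 2
--         else:
--             return text[start_index + 1:j], j + 1
--
--     # Unterminated string literal; advance to end
--     return None, n
-- ===== Notes on version B (the rewrite author's own statement) =====
-- stated objective: alternative
-- what changed: Replaces the per-character while-loop with a mutable escape flag by str.find-based jumps between the next closing quote / backslash, skipping each backslash together with the character it escapes.
-- outside the precondition, e.g. on _extract_string_literal_from_text("'a'", -3): A returns ('a', 0), B returns ('a', 3); on _extract_string_literal_from_text('ab', -5): A raises IndexError, B raises IndexError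
import Mathlib
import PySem

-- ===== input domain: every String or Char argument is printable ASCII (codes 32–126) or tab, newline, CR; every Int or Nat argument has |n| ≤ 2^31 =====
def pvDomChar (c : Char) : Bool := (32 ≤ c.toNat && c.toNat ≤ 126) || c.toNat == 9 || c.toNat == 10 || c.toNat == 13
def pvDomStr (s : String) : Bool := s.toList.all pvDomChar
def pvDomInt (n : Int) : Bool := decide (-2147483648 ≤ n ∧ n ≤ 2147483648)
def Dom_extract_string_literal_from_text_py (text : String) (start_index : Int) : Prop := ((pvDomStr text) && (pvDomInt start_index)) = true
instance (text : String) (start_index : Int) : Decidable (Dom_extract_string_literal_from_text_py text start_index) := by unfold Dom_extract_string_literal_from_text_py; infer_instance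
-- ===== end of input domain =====

-- B replaces A's per-character escape-flag while-loop by str.find-based jumps to the
-- next closing quote / backslash, skipping each backslash with the char it escapes.

-- Python's text[i] for an in-range nonnegative index i (both loops only read in-range indices).
def chAt (cs : List Char) (i : Nat) : Char := cs.getD i ' '

-- ===== PORT A =====
-- A's while loop: index i, escape flag; an unescaped quote returns text[start_index+1:i], i+1
-- (the slice has nonnegative in-order bounds here, so it is drop/take).
-- fuel is a totality guard only: it starts at cs.length and the loop moves right each step.
def loopA (cs : List Char) (quote : Char) (start : Nat) : Nat → Nat → Bool → Option String × Int
  | 0, _, _ => (none, (cs.length : Int))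
  | fuel+1, i, escape =>
    if i < cs.length then
      let ch := chAt cs i
      if escape then loopA cs quote start fuel (i+1) false
      else if ch = '\\' then loopA cs quote start fuel (i+1) true
      else if ch = quote then
        (some (String.ofList ((cs.drop (start+1)).take (i - (start+1)))), ((i : Int) + 1))
      else loopA cs quote start fuel (i+1) escape
    else (none, (cs.length : Int))

def extract_string_literal_from_text_py (text : String) (start_index : Int) : Option String × Int :=
  let cs := text.toList
  if (cs.length : Int) ≤ start_index then (none, start_index)
  else
    match PySem.List.pyGet? cs start_index with
    | none => (none, start_index)   -- Python raises IndexError here (start_index < -len); outside Pre_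
    | some quote =>
      if quote = '"' ∨ quote = '\'' then
        -- loop ported for 0 ≤ start_index (Pre_); negative-index wraparound is excluded by Pre_
        loopA cs quote start_index.toNat cs.length (start_index.toNat + 1) false
      else (none, start_index)

-- ===== PORT B =====
-- text.find(c, i) for a single character c and a nonnegative start i (as Source B uses it):
-- some j = lowest index ≥ i holding c, none = -1. fuel (= cs.length at call sites) is a totality guard.
def findFrom (cs : List Char) (c : Char) : Nat → Nat → Option Nat
  | 0, _ => none
  | fuel+1, i =>
    if i < cs.length then
      if chAt cs i = c then some i else findFrom cs c fuel (i+1)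
    else none

-- B's while loop: jump to the first quote / backslash at or after i.
def loopB (cs : List Char) (quote : Char) (start : Nat) : Nat → Nat → Option String × Int
  | 0, _ => (none, (cs.length : Int))
  | fuel+1, i =>
    if i < cs.length then
      match findFrom cs quote cs.length i, findFrom cs '\\' cs.length i with
      | none, none => (none, (cs.length : Int))
      | some a, none =>
        if chAt cs a = '\\' then loopB cs quote start fuel (a+2)
        else (some (String.ofList ((cs.drop (start+1)).take (a - (start+1)))), ((a : Int) + 1))
      | none, some b =>
        if chAt cs b = '\\' then loopB cs quote start fuel (b+2)
        else (some (String.ofList ((cs.drop (start+1)).take (b - (start+1)))), ((b : Int) + 1))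
      | some a, some b =>
        let j := min a b
        if chAt cs j = '\\' then loopB cs quote start fuel (j+2)
        else (some (String.ofList ((cs.drop (start+1)).take (j - (start+1)))), ((j : Int) + 1))
    else (none, (cs.length : Int))

def extract_string_literal_from_text_py_alt (text : String) (start_index : Int) : Option String × Int :=
  let cs := text.toList
  if (cs.length : Int) ≤ start_index then (none, start_index)
  else
    match PySem.List.pyGet? cs start_index with
    | none => (none, start_index)
    | some quote =>
      if quote = '"' ∨ quote = '\'' then
        loopB cs quote start_index.toNat cs.length (start_index.toNat + 1)
      else (none, start_index)

-- ===== PRECONDITION & SPEC =====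
-- Pre_ excludes only start_index < -len(text), where A raises IndexError, and the
-- negative start_index that wrap onto an opening quote, where A's scan mixes Python's
-- accidental negative-index wraparound with nonnegative indexing and B's find-based
-- scan does not reproduce it; negative start_index wrapping onto a non-quote stay inside.
def Pre_extract_string_literal_from_text_py (text : String) (start_index : Int) : Prop :=
  0 ≤ start_index ∨
    ((PySem.List.pyGet? text.toList start_index).elim false
      (fun c => !(c == '"' || c == '\''))) = true
instance (text : String) (start_index : Int) : Decidable (Pre_extract_string_literal_from_text_py text start_index) := by unfold Pre_extract_string_literal_from_text_py; infer_instance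

def pvWitness_extract_string_literal_from_text_py : String × Int := ("'a'", 0)

def Spec_extract_string_literal_from_text_py (text : String) (start_index : Int) (out : Option String × Int) : Prop := out = extract_string_literal_from_text_py_alt text start_index
instance (text : String) (start_index : Int) (out : Option String × Int) : Decidable (Spec_extract_string_literal_from_text_py text start_index out) := by unfold Spec_extract_string_literal_from_text_py; infer_instance

-- ===== CLAIM (what is proved, stated in full; the proofs are below) =====
def Claim_equal_extract_string_literal_from_text_py : Prop := ∀ (text : String) (start_index : Int), Dom_extract_string_literal_from_text_py text start_index → Pre_extract_string_literal_from_text_py text start_index → Spec_extract_string_literal_from_text_py text start_index (extract_string_literal_from_text_py text start_index)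

-- ===== LEMMAS AND PROOFS =====

theorem findFrom_some_ge {cs : List Char} {c : Char} :
    ∀ fuel i j, findFrom cs c fuel i = some j → i ≤ j := by
  intro fuel
  induction fuel with
  | zero => intro i j h; simp [findFrom] at h
  | succ fuel ih =>
    intro i j h
    rw [findFrom] at h
    by_cases hi : i < cs.length
    · rw [if_pos hi] at h
      by_cases hc : chAt cs i = c
      · rw [if_pos hc] at h
        have hij : i = j := by simpa using h
        omega
      · rw [if_neg hc] at h
        exact Nat.le_of_succ_le (ih (i+1) j h)
    · rw [if_neg hi] at h; exact absurd h (by simp)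

theorem findFrom_some_spec {cs : List Char} {c : Char} :
    ∀ fuel i j, findFrom cs c fuel i = some j →
    j < cs.length ∧ chAt cs j = c ∧ ∀ m, i ≤ m → m < j → chAt cs m ≠ c := by
  intro fuel
  induction fuel with
  | zero => intro i j h; simp [findFrom] at h
  | succ fuel ih =>
    intro i j h
    rw [findFrom] at h
    by_cases hi : i < cs.length
    · rw [if_pos hi] at h
      by_cases hc : chAt cs i = c
      · rw [if_pos hc] at h
        have hij : i = j := by simpa using h
        subst hij
        exact ⟨hi, hc, fun m h1 h2 => absurd (lt_of_le_of_lt h1 h2) (lt_irrefl _)⟩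
      · rw [if_neg hc] at h
        obtain ⟨h1, h2, h3⟩ := ih (i+1) j h
        refine ⟨h1, h2, ?_⟩
        intro m hm1 hm2
        rcases Nat.eq_or_lt_of_le hm1 with rfl | hm1
        · exact hc
        · exact h3 m hm1 hm2
    · rw [if_neg hi] at h; exact absurd h (by simp)

theorem findFrom_none_spec {cs : List Char} {c : Char} :
    ∀ fuel i, cs.length ≤ fuel + i → findFrom cs c fuel i = none →
    ∀ m, i ≤ m → m < cs.length → chAt cs m ≠ c := by
  intro fuel
  induction fuel with
  | zero => intro i hf h m hm1 hm2; omega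
  | succ fuel ih =>
    intro i hf h m hm1 hm2
    rw [findFrom] at h
    rw [if_pos (by omega : i < cs.length)] at h
    by_cases hc : chAt cs i = c
    · rw [if_pos hc] at h; exact absurd h (by simp)
    · rw [if_neg hc] at h
      rcases Nat.eq_or_lt_of_le hm1 with rfl | hm1
      · exact hc
      · exact ih (i+1) (by omega) h m hm1 hm2

-- with the cursor at or past the end, both loops return (None, len) whatever the fuel
theorem loopA_end {cs : List Char} {quote : Char} {start : Nat} :
    ∀ fuel i e, cs.length ≤ i → loopA cs quote start fuel i e = (none, (cs.length : Int)) := by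
  intro fuel i e h
  cases fuel with
  | zero => rfl
  | succ fuel => rw [loopA]; rw [if_neg (by omega)]

theorem loopB_end {cs : List Char} {quote : Char} {start : Nat} :
    ∀ fuel i, cs.length ≤ i → loopB cs quote start fuel i = (none, (cs.length : Int)) := by
  intro fuel i h
  cases fuel with
  | zero => rfl
  | succ fuel => rw [loopB]; rw [if_neg (by omega)]

-- fuel is irrelevant as long as it reaches the end of the text
theorem loopA_fuel {cs : List Char} {quote : Char} {start : Nat} :
    ∀ f1 f2 i e, cs.length ≤ f1 + i → cs.length ≤ f2 + i →
    loopA cs quote start f1 i e = loopA cs quote start f2 i e := by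
  intro f1
  induction f1 with
  | zero =>
    intro f2 i e h1 h2
    rw [loopA_end 0 i e (by omega), loopA_end f2 i e (by omega)]
  | succ f1 ih =>
    intro f2 i e h1 h2
    by_cases hi : i < cs.length
    · cases f2 with
      | zero => omega
      | succ g =>
        rw [loopA, loopA]
        rw [if_pos hi, if_pos hi]
        simp only
        by_cases he : e
        · rw [if_pos he, if_pos he]; exact ih g (i+1) false (by omega) (by omega)
        · rw [if_neg he, if_neg he]
          by_cases hb : chAt cs i = '\\'
          · rw [if_pos hb, if_pos hb]; exact ih g (i+1) true (by omega) (by omega)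
          · rw [if_neg hb, if_neg hb]
            by_cases hq : chAt cs i = quote
            · rw [if_pos hq, if_pos hq]
            · rw [if_neg hq, if_neg hq]; exact ih g (i+1) e (by omega) (by omega)
    · rw [loopA_end _ i e (by omega), loopA_end f2 i e (by omega)]

theorem loopB_fuel {cs : List Char} {quote : Char} {start : Nat} :
    ∀ f1 f2 i, cs.length ≤ f1 + i → cs.length ≤ f2 + i →
    loopB cs quote start f1 i = loopB cs quote start f2 i := by
  intro f1
  induction f1 with
  | zero =>
    intro f2 i h1 h2
    rw [loopB_end 0 i (by omega), loopB_end f2 i (by omega)]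
  | succ f1 ih =>
    intro f2 i h1 h2
    by_cases hi : i < cs.length
    · cases f2 with
      | zero => omega
      | succ g =>
        rw [loopB, loopB]
        rw [if_pos hi, if_pos hi]
        rcases hq : findFrom cs quote cs.length i with _ | a <;>
          rcases hb : findFrom cs '\\' cs.length i with _ | b <;> simp only
        · have hbge := findFrom_some_ge cs.length i b hb
          by_cases hc : chAt cs b = '\\'
          · rw [if_pos hc, if_pos hc]; exact ih g (b+2) (by omega) (by omega)
          · rw [if_neg hc, if_neg hc]
        · have hage := findFrom_some_ge cs.length i a hq
          by_cases hc : chAt cs a = '\\'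
          · rw [if_pos hc, if_pos hc]; exact ih g (a+2) (by omega) (by omega)
          · rw [if_neg hc, if_neg hc]
        · have hage := findFrom_some_ge cs.length i a hq
          have hbge := findFrom_some_ge cs.length i b hb
          have hm : i ≤ min a b := le_min hage hbge
          by_cases hc : chAt cs (min a b) = '\\'
          · rw [if_pos hc, if_pos hc]
            exact ih g (min a b + 2) (by omega) (by omega)
          · rw [if_neg hc, if_neg hc]
    · rw [loopB_end _ i (by omega), loopB_end f2 i (by omega)]

-- one unfolding of loopA at the canonical fuel cs.length
theorem loopA_len_unfold {cs : List Char} {quote : Char} {start : Nat} (i : Nat) (e : Bool) :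
    loopA cs quote start cs.length i e =
      if i < cs.length then
        (if e then loopA cs quote start cs.length (i+1) false
         else if chAt cs i = '\\' then loopA cs quote start cs.length (i+1) true
         else if chAt cs i = quote then
           (some (String.ofList ((cs.drop (start+1)).take (i - (start+1)))), ((i : Int) + 1))
         else loopA cs quote start cs.length (i+1) e)
      else (none, (cs.length : Int)) := by
  rw [loopA_fuel cs.length (cs.length + 1) i e (by omega) (by omega)]
  rw [loopA]

theorem loopB_len_unfold {cs : List Char} {quote : Char} {start : Nat} (i : Nat) :
    loopB cs quote start cs.length i =
      if i < cs.length then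
        match findFrom cs quote cs.length i, findFrom cs '\\' cs.length i with
        | none, none => (none, (cs.length : Int))
        | some a, none =>
          if chAt cs a = '\\' then loopB cs quote start cs.length (a+2)
          else (some (String.ofList ((cs.drop (start+1)).take (a - (start+1)))), ((a : Int) + 1))
        | none, some b =>
          if chAt cs b = '\\' then loopB cs quote start cs.length (b+2)
          else (some (String.ofList ((cs.drop (start+1)).take (b - (start+1)))), ((b : Int) + 1))
        | some a, some b =>
          let j := min a b
          if chAt cs j = '\\' then loopB cs quote start cs.length (j+2)
          else (some (String.ofList ((cs.drop (start+1)).take (j - (start+1)))), ((j : Int) + 1))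
      else (none, (cs.length : Int)) := by
  rw [loopB_fuel cs.length (cs.length + 1) i (by omega) (by omega)]
  rw [loopB]

-- loopA walks over uninteresting characters unchanged
theorem loopA_scan {cs : List Char} {quote : Char} {start : Nat} :
    ∀ k i j, j - i ≤ k → i ≤ j → j ≤ cs.length →
    (∀ m, i ≤ m → m < j → chAt cs m ≠ quote ∧ chAt cs m ≠ '\\') →
    loopA cs quote start cs.length i false = loopA cs quote start cs.length j false := by
  intro k
  induction k with
  | zero =>
    intro i j h0 h1 _ _
    have : i = j := by omega
    rw [this]
  | succ k ih =>
    intro i j h0 h1 h2 h3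
    rcases Nat.eq_or_lt_of_le h1 with rfl | h1
    · rfl
    · have hmid := h3 i (le_refl _) (by omega)
      rw [loopA_len_unfold i false]
      rw [if_pos (by omega : i < cs.length)]
      simp only [Bool.false_eq_true, if_false, if_neg hmid.2, if_neg hmid.1]
      exact ih (i+1) j (by omega) (by omega) h2 (fun m hm1 hm2 => h3 m (by omega) hm2)

-- with the escape flag set, loopA consumes one character unconditionally
theorem loopA_escape {cs : List Char} {quote : Char} {start j : Nat}
    (hj : j < cs.length) :
    loopA cs quote start cs.length j true = loopA cs quote start cs.length (j+1) false := by
  rw [loopA_len_unfold j true, if_pos hj, if_pos rfl]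

-- at a backslash, loopA skips two characters
theorem loopA_backslash {cs : List Char} {quote : Char} {start j : Nat}
    (hj : j < cs.length) (hc : chAt cs j = '\\') :
    loopA cs quote start cs.length j false = loopA cs quote start cs.length (j+2) false := by
  rw [loopA_len_unfold j false, if_pos hj]
  simp only [Bool.false_eq_true, if_false, if_pos hc]
  by_cases hj1 : j + 1 < cs.length
  · rw [loopA_escape hj1]
  · rw [loopA_end cs.length (j+1) true (by omega)]
    exact (loopA_end cs.length (j+2) false (by omega)).symm

-- at an unescaped quote, loopA returns
theorem loopA_quote {cs : List Char} {quote : Char} {start j : Nat}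
    (hj : j < cs.length) (hc : chAt cs j = quote) (hne : chAt cs j ≠ '\\') :
    loopA cs quote start cs.length j false =
      (some (String.ofList ((cs.drop (start+1)).take (j - (start+1)))), ((j : Int) + 1)) := by
  rw [loopA_len_unfold j false, if_pos hj]
  simp only [Bool.false_eq_true, if_false, if_neg hne, if_pos hc]

-- the main loop equivalence at the canonical fuel
theorem loop_eq {cs : List Char} {quote : Char} {start : Nat} :
    ∀ k i, cs.length - i ≤ k →
    loopA cs quote start cs.length i false = loopB cs quote start cs.length i := by
  intro k
  induction k with
  | zero =>
    intro i h0
    rw [loopA_end cs.length i false (by omega), loopB_end cs.length i (by omega)]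
  | succ k ih =>
    intro i h0
    rw [loopB_len_unfold i]
    by_cases hi : i < cs.length
    · rw [if_pos hi]
      -- finish from a known first interesting index j
      have main : ∀ j, i ≤ j → j < cs.length →
          (chAt cs j = quote ∨ chAt cs j = '\\') →
          (∀ m, i ≤ m → m < j → chAt cs m ≠ quote ∧ chAt cs m ≠ '\\') →
          loopA cs quote start cs.length i false =
            (if chAt cs j = '\\' then loopB cs quote start cs.length (j+2)
             else (some (String.ofList ((cs.drop (start+1)).take (j - (start+1)))), ((j : Int) + 1))) := by
        intro j h1 h2 h3 h4
        rw [loopA_scan (j - i) i j (le_refl _) h1 (le_of_lt h2) h4]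
        by_cases hbs : chAt cs j = '\\'
        · rw [if_pos hbs, loopA_backslash h2 hbs]
          exact ih (j+2) (by omega)
        · have hq : chAt cs j = quote := h3.resolve_right hbs
          rw [if_neg hbs, loopA_quote h2 hq hbs]
      rcases hq : findFrom cs quote cs.length i with _ | a <;>
        rcases hb : findFrom cs '\\' cs.length i with _ | b <;> simp only
      · -- no quote, no backslash: run to the end
        have hnq := findFrom_none_spec cs.length i (by omega) hq
        have hnb := findFrom_none_spec cs.length i (by omega) hb
        rw [loopA_scan (cs.length - i) i cs.length (le_refl _) (by omega) (le_refl _)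
          (fun m hm1 hm2 => ⟨hnq m hm1 hm2, hnb m hm1 hm2⟩)]
        exact loopA_end cs.length cs.length false (le_refl _)
      · -- only a backslash ahead
        have h1 := findFrom_some_ge cs.length i b hb
        obtain ⟨h2, h3, h4⟩ := findFrom_some_spec cs.length i b hb
        have hnq := findFrom_none_spec cs.length i (by omega) hq
        exact main b h1 h2 (Or.inr h3)
          (fun m hm1 hm2 => ⟨hnq m hm1 (by omega), h4 m hm1 hm2⟩)
      · -- only a quote ahead
        have h1 := findFrom_some_ge cs.length i a hq
        obtain ⟨h2, h3, h4⟩ := findFrom_some_spec cs.length i a hq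
        have hnb := findFrom_none_spec cs.length i (by omega) hb
        exact main a h1 h2 (Or.inl h3)
          (fun m hm1 hm2 => ⟨h4 m hm1 hm2, hnb m hm1 (by omega)⟩)
      · -- both ahead: the nearer one
        have ha1 := findFrom_some_ge cs.length i a hq
        obtain ⟨ha2, ha3, ha4⟩ := findFrom_some_spec cs.length i a hq
        have hb1 := findFrom_some_ge cs.length i b hb
        obtain ⟨hb2, hb3, hb4⟩ := findFrom_some_spec cs.length i b hb
        have hmem : chAt cs (min a b) = quote ∨ chAt cs (min a b) = '\\' := by
          rcases le_total a b with hle | hle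
          · left; rwa [min_eq_left hle]
          · right; rwa [min_eq_right hle]
        exact main (min a b) (le_min ha1 hb1) (lt_of_le_of_lt (min_le_left _ _) ha2) hmem
          (fun m hm1 hm2 => ⟨ha4 m hm1 (lt_of_lt_of_le hm2 (min_le_left _ _)),
                             hb4 m hm1 (lt_of_lt_of_le hm2 (min_le_right _ _))⟩)
    · rw [if_neg hi]
      exact loopA_end cs.length i false (by omega)

-- ===== VERDICT (by name: the statement is the Claim_ definition above) =====
theorem extract_string_literal_from_text_py_spec : Claim_equal_extract_string_literal_from_text_py := by
  intro text start_index _ _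
  unfold Spec_extract_string_literal_from_text_py
  unfold extract_string_literal_from_text_py extract_string_literal_from_text_py_alt
  have h : ∀ (q : Char),
      loopA text.toList q start_index.toNat text.toList.length (start_index.toNat + 1) false
        = loopB text.toList q start_index.toNat text.toList.length (start_index.toNat + 1) :=
    fun q => loop_eq text.toList.length (start_index.toNat + 1) (by omega)
  simp only [h]
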